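-- pv_equiv track=rewrite | github.com/sahooomm/time-generator | geneticAlgo.py | separateChromosome
-- ===== SOURCE A (Python) =====
-- def separateChromosome(chromosome):
--     sem2 = {}
--     sem4 = {}
--     sem6 = {}
--     sem8 = {}
--     dayMap = {1:"Mon", 2:"Tue" , 3:"Wed" , 4:"Thurs" , 5:"Fri"}
--     for i in range(len(chromosome)):
--
--         sem2[dayMap[i+1]] = []
--         sem4[dayMap[i+1]] = []
--         sem6[dayMap[i+1]] = []
--         sem8[dayMap[i+1]] = []
--         for  slot in chromosome[i]:
--             sem2[dayMap[i+1]].append(slot[0])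
--             sem4[dayMap[i+1]].append(slot[1])
--             sem6[dayMap[i+1]].append(slot[2])
--             sem8[dayMap[i+1]].append(slot[3])
--     return sem2,sem4,sem6,sem8
-- ===== SOURCE B (Python) =====
-- def separateChromosome(chromosome):
--     dayNames = ["Mon", "Tue", "Wed", "Thurs", "Fri"]
--
--     def sem(k):
--         return {dayNames[i]: [slot[k] for slot in day]
--                 for i, day in enumerate(chromosome)}
--
--     return sem(0), sem(1), sem(2), sem(3)
-- ===== Notes on version B (the rewrite author's own statement) =====
-- stated objective: alternative
-- what changed: Replaces the row-major loop that mutates four dicts per slot (init-to-[] then append) with four independent single-pass dict comprehensions, one per semester column, each mapping a day's slot list directly to its column.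
import Mathlib
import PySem

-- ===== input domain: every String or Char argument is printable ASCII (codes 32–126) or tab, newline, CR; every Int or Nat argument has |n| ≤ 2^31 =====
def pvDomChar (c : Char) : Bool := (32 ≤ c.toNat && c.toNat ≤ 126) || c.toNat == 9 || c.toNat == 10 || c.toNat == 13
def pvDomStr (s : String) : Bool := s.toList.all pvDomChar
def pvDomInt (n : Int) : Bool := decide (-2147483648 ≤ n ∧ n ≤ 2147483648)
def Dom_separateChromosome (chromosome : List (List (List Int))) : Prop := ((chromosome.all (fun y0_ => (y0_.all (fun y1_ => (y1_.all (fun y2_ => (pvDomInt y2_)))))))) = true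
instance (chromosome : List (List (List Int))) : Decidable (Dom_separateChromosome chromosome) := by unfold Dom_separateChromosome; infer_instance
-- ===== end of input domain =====

-- B builds each semester dict in one comprehension per column instead of A's row-major
-- append loop over four mutable dicts; same cost, different traversal shape.

-- ===== PORT A =====
def dayMapA : PySem.Dict Int String :=
  PySem.Dict.ofList [(1, "Mon"), (2, "Tue"), (3, "Wed"), (4, "Thurs"), (5, "Fri")]

-- state: (sem2, sem4, sem6, sem8)
-- slot[k] is ported as pyGetD slot k 0: exact under Pre_ (every slot has length ≥ 4);
-- dayMap[i+1] as getD with default "": exact under Pre_ (at most 5 days);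
-- sem2[day].append(x) as modify day [] (· ++ [x]): the key is always present here.
def stepDayA (chromosome : List (List (List Int)))
    (s : PySem.Dict String (List Int) × PySem.Dict String (List Int) × PySem.Dict String (List Int) × PySem.Dict String (List Int))
    (i : Int) :
    PySem.Dict String (List Int) × PySem.Dict String (List Int) × PySem.Dict String (List Int) × PySem.Dict String (List Int) :=
  let day := dayMapA.getD (i + 1) ""
  let s0 := (s.1.insert day [], s.2.1.insert day [], s.2.2.1.insert day [], s.2.2.2.insert day [])
  (PySem.List.pyGetD chromosome i []).foldl
    (fun t slot =>
      (t.1.modify day [] (fun l => l ++ [PySem.List.pyGetD slot 0 0]),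
       t.2.1.modify day [] (fun l => l ++ [PySem.List.pyGetD slot 1 0]),
       t.2.2.1.modify day [] (fun l => l ++ [PySem.List.pyGetD slot 2 0]),
       t.2.2.2.modify day [] (fun l => l ++ [PySem.List.pyGetD slot 3 0]))) s0

def separateChromosome (chromosome : List (List (List Int))) : (List (String × List Int)) × (List (String × List Int)) × (List (String × List Int)) × (List (String × List Int)) :=
  let r := (PySem.List.pyRange 0 (chromosome.length : Int) 1).foldl (stepDayA chromosome)
    (PySem.Dict.empty, PySem.Dict.empty, PySem.Dict.empty, PySem.Dict.empty)
  (r.1.items, r.2.1.items, r.2.2.1.items, r.2.2.2.items)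

-- ===== PORT B =====
def dayNamesB : List String := ["Mon", "Tue", "Wed", "Thurs", "Fri"]

-- one dict comprehension {dayNames[i]: [slot[k] for slot in day] for i, day in enumerate(chromosome)}
def semB (chromosome : List (List (List Int))) (k : Int) : List (String × List Int) :=
  ((PySem.List.enumerate chromosome).foldl
    (fun (d : PySem.Dict String (List Int)) p =>
      d.insert (PySem.List.pyGetD dayNamesB p.1 "")
        (p.2.map (fun slot => PySem.List.pyGetD slot k 0)))
    PySem.Dict.empty).items

def separateChromosome_alt (chromosome : List (List (List Int))) : (List (String × List Int)) × (List (String × List Int)) × (List (String × List Int)) × (List (String × List Int)) :=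
  (semB chromosome 0, semB chromosome 1, semB chromosome 2, semB chromosome 3)

-- ===== PRECONDITION & SPEC =====
-- Pre_ = exactly where Python A returns: at most 5 days (else dayMap[i+1] raises KeyError)
-- and every slot has at least 4 entries (else slot[3] raises IndexError). B raises there too.
def Pre_separateChromosome (chromosome : List (List (List Int))) : Prop :=
  chromosome.length ≤ 5 ∧ ∀ day ∈ chromosome, ∀ slot ∈ day, 4 ≤ slot.length
instance (chromosome : List (List (List Int))) : Decidable (Pre_separateChromosome chromosome) := by unfold Pre_separateChromosome; infer_instance

def pvWitness_separateChromosome : List (List (List Int)) :=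
  [[[1, 2, 3, 4], [5, 6, 7, 8]], [], [[9, 10, 11, 12]]]

def Spec_separateChromosome (chromosome : List (List (List Int))) (out : (List (String × List Int)) × (List (String × List Int)) × (List (String × List Int)) × (List (String × List Int))) : Prop := out = separateChromosome_alt chromosome
instance (chromosome : List (List (List Int))) (out : (List (String × List Int)) × (List (String × List Int)) × (List (String × List Int)) × (List (String × List Int))) : Decidable (Spec_separateChromosome chromosome out) := by unfold Spec_separateChromosome; infer_instance

-- ===== CLAIM (what is proved, stated in full; the proofs are below) =====
def Claim_equal_separateChromosome : Prop := ∀ (chromosome : List (List (List Int))), Dom_separateChromosome chromosome → Pre_separateChromosome chromosome → Spec_separateChromosome chromosome (separateChromosome chromosome)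

-- ===== LEMMAS AND PROOFS =====

-- the two ways of naming day i agree for every i ≥ 0
lemma dayName_eq (i : Int) (h : 0 ≤ i) :
    dayMapA.getD (i + 1) "" = PySem.List.pyGetD dayNamesB i "" := by
  lift i to ℕ using h
  match n : i with
  | 0 | 1 | 2 | 3 | 4 => decide
  | (m + 5 : ℕ) =>
    have h1 : dayMapA.get? ((m : Int) + 5 + 1) = none := by
      have e : ∀ k : Int, k ≤ 5 → (k == (m : Int) + 5 + 1) = false := by
        intro k hk; rw [beq_eq_false_iff_ne]; omega
      simp [dayMapA, PySem.Dict.get?, PySem.Dict.ofList, PySem.Dict.update,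
        PySem.Dict.empty, PySem.Dict.insert, List.find?, e]
    have h2 : PySem.List.pyGet? dayNamesB ((m : Int) + 5) = none := by
      simp only [dayNamesB, PySem.List.pyGet?, PySem.List.pyIdx?]
      norm_num
      intro a h
      split_ifs at h <;> simp_all <;> omega
    simp [PySem.Dict.getD_eq_get?_getD, PySem.List.pyGetD, h1, h2]

-- a fold over a 4-tuple state with independent components splits into four folds
lemma foldl_prod4 {α β γ δ ε : Type} (l : List ε)
    (f1 : α → ε → α) (f2 : β → ε → β) (f3 : γ → ε → γ) (f4 : δ → ε → δ)
    (a : α) (b : β) (c : γ) (d : δ) :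
    l.foldl (fun t x => (f1 t.1 x, f2 t.2.1 x, f3 t.2.2.1 x, f4 t.2.2.2 x)) (a, b, c, d)
      = (l.foldl f1 a, l.foldl f2 b, l.foldl f3 c, l.foldl f4 d) := by
  induction l generalizing a b c d with
  | nil => rfl
  | cons x xs ih => simp [List.foldl, ih]

-- A's init-to-[] then append loop over one dict equals a single insert of the mapped row
lemma foldl_modify_insert (row : List (List Int)) (g : List Int → Int)
    (d : PySem.Dict String (List Int)) (day : String) (acc : List Int) :
    row.foldl (fun t slot => PySem.Dict.modify t day [] (fun l => l ++ [g slot]))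
        (d.insert day acc)
      = d.insert day (acc ++ row.map g) := by
  induction row generalizing acc with
  | nil => simp
  | cons r rs ih =>
    rw [List.foldl_cons]
    have h1 : PySem.Dict.modify (d.insert day acc) day [] (fun l => l ++ [g r])
        = d.insert day (acc ++ [g r]) := by
      simp [PySem.Dict.modify, PySem.Dict.insert_insert_self]
    rw [h1, ih]
    simp

-- B's per-day insert, phrased with A's day naming
def dayInsert (chromosome : List (List (List Int))) (k : Int)
    (d : PySem.Dict String (List Int)) (i : Int) : PySem.Dict String (List Int) :=
  d.insert (dayMapA.getD (i + 1) "")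
    ((PySem.List.pyGetD chromosome i []).map (fun slot => PySem.List.pyGetD slot k 0))

-- A's whole day step is the 4-tuple of single-dict day inserts
lemma stepDayA_eq (chromosome : List (List (List Int)))
    (t : PySem.Dict String (List Int) × PySem.Dict String (List Int) × PySem.Dict String (List Int) × PySem.Dict String (List Int))
    (i : Int) :
    stepDayA chromosome t i =
      (dayInsert chromosome 0 t.1 i, dayInsert chromosome 1 t.2.1 i,
       dayInsert chromosome 2 t.2.2.1 i, dayInsert chromosome 3 t.2.2.2 i) := by
  unfold stepDayA
  dsimp only
  rw [foldl_prod4 (PySem.List.pyGetD chromosome i [])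
    (fun d slot => PySem.Dict.modify d (dayMapA.getD (i + 1) "") [] (fun l => l ++ [PySem.List.pyGetD slot 0 0]))
    (fun d slot => PySem.Dict.modify d (dayMapA.getD (i + 1) "") [] (fun l => l ++ [PySem.List.pyGetD slot 1 0]))
    (fun d slot => PySem.Dict.modify d (dayMapA.getD (i + 1) "") [] (fun l => l ++ [PySem.List.pyGetD slot 2 0]))
    (fun d slot => PySem.Dict.modify d (dayMapA.getD (i + 1) "") [] (fun l => l ++ [PySem.List.pyGetD slot 3 0]))]
  simp only [dayInsert]
  rw [foldl_modify_insert, foldl_modify_insert, foldl_modify_insert, foldl_modify_insert]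
  simp

-- one component of A equals one comprehension of B
lemma component_eq (chromosome : List (List (List Int))) (k : Int) :
    ((PySem.List.pyRange 0 (chromosome.length : Int) 1).foldl (dayInsert chromosome k)
      PySem.Dict.empty).items = semB chromosome k := by
  unfold semB
  rw [PySem.List.enumerate_eq_map_pyRange chromosome ([] : List (List Int)), List.foldl_map]
  have hlen : PySem.List.len chromosome = (chromosome.length : Int) := by
    simp [PySem.List.len]
  rw [hlen]
  congr 1
  apply PySem.List.foldl_congr_mem
  intro acc i hi
  have h0 : 0 ≤ i := (PySem.List.mem_pyRange_one.mp hi).1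
  simp [dayInsert, dayName_eq i h0]

-- ===== VERDICT (by name: the statement is the Claim_ definition above) =====
theorem separateChromosome_spec : Claim_equal_separateChromosome := by
  intro chromosome _ _
  unfold Spec_separateChromosome separateChromosome separateChromosome_alt
  have hstep : (PySem.List.pyRange 0 (chromosome.length : Int) 1).foldl (stepDayA chromosome)
      (PySem.Dict.empty, PySem.Dict.empty, PySem.Dict.empty, PySem.Dict.empty)
      = ((PySem.List.pyRange 0 (chromosome.length : Int) 1).foldl (dayInsert chromosome 0) PySem.Dict.empty,
         (PySem.List.pyRange 0 (chromosome.length : Int) 1).foldl (dayInsert chromosome 1) PySem.Dict.empty,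
         (PySem.List.pyRange 0 (chromosome.length : Int) 1).foldl (dayInsert chromosome 2) PySem.Dict.empty,
         (PySem.List.pyRange 0 (chromosome.length : Int) 1).foldl (dayInsert chromosome 3) PySem.Dict.empty) := by
    rw [PySem.List.foldl_congr_mem _ (stepDayA chromosome)
      (fun t i => (dayInsert chromosome 0 t.1 i, dayInsert chromosome 1 t.2.1 i,
        dayInsert chromosome 2 t.2.2.1 i, dayInsert chromosome 3 t.2.2.2 i)) _
      (fun t i _ => stepDayA_eq chromosome t i)]
    exact foldl_prod4 _ _ _ _ _ _ _ _ _
  rw [hstep]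
  simp only []
  rw [component_eq, component_eq, component_eq, component_eq]
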